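-- pv_equiv track=rewrite | github.com/AlexanderGHA/DSW-County-Demographics-Lab | countyDemographics.py | state_with_most_counties
-- ===== SOURCE A (Python) =====
-- import operator
--
-- def state_with_most_counties(counties):
--     """Return a state that has the most counties."""
--     #Make a dictionary that has a key for each state and the values keep track of the number of counties in each state
--     states = {}
--
--     #Find the state in the dictionary with the most counties
--     for c in counties:
--         state = c["State"]
--         if state in states:
--             states[state] += 1
--         else:
--             states[state] = 1
--
--     #Return the state with the most counties
--     state = sorted(states.items(), key=operator.itemgetter(1))[len(states)-1]
--     return state[0] + ": " + str(state[1])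
-- ===== SOURCE B (Python) =====
-- def state_with_most_counties(counties):
--     """Return a state that has the most counties."""
--     states = {}
--     for c in counties:
--         states[c["State"]] = states.get(c["State"], 0) + 1
--     # single linear scan; >= makes the last-inserted state win among ties,
--     # matching A's sorted-stable last-element pick
--     best_state = None
--     best_count = 0
--     for state, count in states.items():
--         if count >= best_count:
--             best_state, best_count = state, count
--     return best_state + ": " + str(best_count)
-- ===== Notes on version B (the rewrite author's own statement) =====
-- stated objective: simpler
-- what changed: Replaces sorting the (state,count) items and indexing the last element with a single linear scan keeping the running best (>= so the last-inserted state wins ties, exactly like sorted's stable last element).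
import Mathlib
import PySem

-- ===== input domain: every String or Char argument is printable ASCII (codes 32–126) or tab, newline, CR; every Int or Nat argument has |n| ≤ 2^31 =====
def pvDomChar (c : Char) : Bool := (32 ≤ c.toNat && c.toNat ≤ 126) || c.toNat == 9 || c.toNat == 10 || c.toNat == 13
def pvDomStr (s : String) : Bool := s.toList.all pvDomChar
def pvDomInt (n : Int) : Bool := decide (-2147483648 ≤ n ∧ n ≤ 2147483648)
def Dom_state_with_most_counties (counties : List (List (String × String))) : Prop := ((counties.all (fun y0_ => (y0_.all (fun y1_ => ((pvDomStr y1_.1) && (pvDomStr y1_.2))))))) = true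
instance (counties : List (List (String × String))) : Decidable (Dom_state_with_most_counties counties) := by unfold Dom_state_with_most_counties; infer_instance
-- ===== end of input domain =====

-- B replaces A's sort-then-take-last over the (state, count) items by one linear
-- scan keeping the running best with `>=` (so the last-inserted state wins ties,
-- exactly like sorted's stable last element); same counting loop, same output.

-- ===== PORT A =====

-- c["State"]: first-match lookup in the county dict; none (KeyError) is excluded
-- by Pre_, the "" default is never reached on admitted inputs.
def pvStateOf (c : List (String × String)) : String :=
  ((PySem.Dict.mk c).get? "State").getD ""

def state_with_most_counties (counties : List (List (String × String))) : String :=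
  let states : PySem.Dict String Int :=
    counties.foldl (fun d c =>
      let state := pvStateOf c
      if d.contains state then d.insert state (d.getD state 0 + 1)
      else d.insert state 1) PySem.Dict.empty
  match PySem.List.pyGet? (PySem.List.sorted states.items (fun p => p.2) false)
        ((states.size : Int) - 1) with
  | some p => p.1 ++ ": " ++ PySem.Int.toStr p.2
  | none => ""   -- IndexError on empty `counties`; excluded by Pre_

-- ===== PORT B =====

def state_with_most_counties_alt (counties : List (List (String × String))) : String :=
  let states : PySem.Dict String Int :=
    counties.foldl (fun d c => d.insert (pvStateOf c) (d.getD (pvStateOf c) 0 + 1))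
      PySem.Dict.empty
  let best : Option String × Int :=
    states.items.foldl (fun b p => if p.2 ≥ b.2 then (some p.1, p.2) else b) (none, 0)
  match best.1 with
  | some s => s ++ ": " ++ PySem.Int.toStr best.2
  | none => ""   -- best_state is None only for empty `counties` (TypeError); excluded by Pre_

-- ===== PRECONDITION & SPEC =====
-- Pre_ excludes exactly the inputs where the Python A raises: empty `counties`
-- (IndexError on sorted(...)[-1]) and a county without a "State" key (KeyError).
def Pre_state_with_most_counties (counties : List (List (String × String))) : Prop :=
  counties ≠ [] ∧ ∀ c ∈ counties, "State" ∈ c.map Prod.fst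
instance (counties : List (List (String × String))) : Decidable (Pre_state_with_most_counties counties) := by unfold Pre_state_with_most_counties; infer_instance

def pvWitness_state_with_most_counties : (List (List (String × String))) :=
  [[("State", "IA")], [("State", "TX")], [("State", "IA")]]

def Spec_state_with_most_counties (counties : List (List (String × String))) (out : String) : Prop := out = state_with_most_counties_alt counties
instance (counties : List (List (String × String))) (out : String) : Decidable (Spec_state_with_most_counties counties out) := by unfold Spec_state_with_most_counties; infer_instance

-- ===== CLAIM (what is proved, stated in full; the proofs are below) =====
def Claim_equal_state_with_most_counties : Prop := ∀ (counties : List (List (String × String))), Dom_state_with_most_counties counties → Pre_state_with_most_counties counties → Spec_state_with_most_counties counties (state_with_most_counties counties)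

-- ===== LEMMAS AND PROOFS =====

-- abbreviations for the proofs only
def pvStepA (d : PySem.Dict String Int) (c : List (String × String)) : PySem.Dict String Int :=
  let state := pvStateOf c
  if d.contains state then d.insert state (d.getD state 0 + 1) else d.insert state 1

def pvStepB (d : PySem.Dict String Int) (c : List (String × String)) : PySem.Dict String Int :=
  d.insert (pvStateOf c) (d.getD (pvStateOf c) 0 + 1)

-- the "last maximum" accumulator B's scan computes, in Option form
def pvG (b : Option (String × Int)) (p : String × Int) : Option (String × Int) :=
  match b with
  | none => some p
  | some q => if q.2 ≤ p.2 then some p else some q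

def pvH (b : Option (String × Int)) : Option String × Int :=
  match b with
  | none => (none, 0)
  | some q => (some q.1, q.2)

lemma pvStep_eq (d : PySem.Dict String Int) (c : List (String × String)) :
    pvStepA d c = pvStepB d c := by
  unfold pvStepA pvStepB
  by_cases h : d.contains (pvStateOf c)
  · simp [h]
  · simp only [Bool.not_eq_true] at h
    simp [h, PySem.Dict.getD_of_not_contains _ _ h]

lemma pvBuild_eq (counties : List (List (String × String))) :
    counties.foldl pvStepA PySem.Dict.empty = counties.foldl pvStepB PySem.Dict.empty := by
  have : pvStepA = pvStepB := funext fun d => funext fun c => pvStep_eq d c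
  rw [this]

lemma pvGetLast?_cons_ne_nil {α : Type} (y : α) {t : List α} (h : t ≠ []) :
    (y :: t).getLast? = t.getLast? := by
  cases t with
  | nil => exact absurd rfl h
  | cons z t' => exact List.getLast?_cons_cons

lemma pvInsertBy_ne_nil (x : String × Int) (acc : List (String × Int)) :
    PySem.List.insertBy (fun a b => decide (a.2 < b.2)) x acc ≠ [] := by
  cases acc with
  | nil => simp [PySem.List.insertBy]
  | cons y t =>
    simp only [PySem.List.insertBy]
    split <;> simp

-- inserting into a key-sorted list: the last element becomes x iff x's count
-- is at least the old last count — exactly B's `>=` update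
lemma pvInsertBy_getLast? (x : String × Int) :
    ∀ (acc : List (String × Int)), acc.Pairwise (fun a b => a.2 ≤ b.2) →
      (PySem.List.insertBy (fun a b => decide (a.2 < b.2)) x acc).getLast? = pvG acc.getLast? x := by
  intro acc
  induction acc with
  | nil => intro _; simp [PySem.List.insertBy, pvG]
  | cons y t ih =>
    intro hp
    rw [List.pairwise_cons] at hp
    simp only [PySem.List.insertBy]
    split
    · -- x.2 < y.2 : x goes in front, last element unchanged
      next hlt =>
      simp only [decide_eq_true_eq] at hlt
      obtain ⟨q, hq⟩ : ∃ q, (y :: t).getLast? = some q := ⟨_, List.getLast?_cons⟩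
      have hqmem : q ∈ y :: t := List.mem_of_getLast? hq
      have hyq : y.2 ≤ q.2 := by
        rcases List.mem_cons.mp hqmem with h | h
        · subst h; exact le_refl _
        · exact hp.1 q h
      have hxq : ¬ q.2 ≤ x.2 := by omega
      rw [List.getLast?_cons_cons, hq]
      simp [pvG, hxq]
    · -- y.2 ≤ x.2 : recurse into the tail
      next hge =>
      simp only [decide_eq_true_eq] at hge
      have hyx : y.2 ≤ x.2 := by omega
      have hne := pvInsertBy_ne_nil x t
      rw [pvGetLast?_cons_ne_nil y hne, ih hp.2]
      cases t with
      | nil => simp [pvG, hyx]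
      | cons z t' => rw [List.getLast?_cons_cons]

-- the last element of the stable sort by count is the `>=`-scan over the items
lemma pvSorted_getLast? (l : List (String × Int)) :
    (PySem.List.sorted l (fun p => p.2) false).getLast? = l.foldl pvG none := by
  induction l using List.reverseRecOn with
  | nil => simp [PySem.List.sorted_eq_foldl_insertBy]
  | append_singleton t x ih =>
    rw [PySem.List.sorted_eq_foldl_insertBy, List.foldl_append, List.foldl_cons, List.foldl_nil,
      ← PySem.List.sorted_eq_foldl_insertBy,
      pvInsertBy_getLast? x _ (PySem.List.sorted_pairwise t (fun p => p.2)), ih,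
      List.foldl_append, List.foldl_cons, List.foldl_nil]

-- B's concrete scan is pvH of the Option-form scan, once all counts are ≥ 0
lemma pvScan_eq (l : List (String × Int)) (b : Option (String × Int))
    (hnn : ∀ p ∈ l, (0:Int) ≤ p.2) :
    l.foldl (fun b p => if p.2 ≥ b.2 then (some p.1, p.2) else b) (pvH b)
      = pvH (l.foldl pvG b) := by
  induction l generalizing b with
  | nil => rfl
  | cons p t ih =>
    have hp : (0:Int) ≤ p.2 := hnn p (List.mem_cons_self)
    have ht : ∀ q ∈ t, (0:Int) ≤ q.2 := fun q hq => hnn q (List.mem_cons_of_mem _ hq)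
    rw [List.foldl_cons, List.foldl_cons]
    have hstep : (if p.2 ≥ (pvH b).2 then (some p.1, p.2) else pvH b) = pvH (pvG b p) := by
      cases b with
      | none => simp [pvH, pvG, hp]
      | some q =>
        simp only [pvH, pvG, ge_iff_le]
        split <;> simp
    rw [hstep, ih _ ht]

-- all counts in the built dictionary are nonnegative
lemma pvFold_nonneg (counties : List (List (String × String))) :
    ∀ (d : PySem.Dict String Int), (∀ p ∈ d.items, (0:Int) ≤ p.2) →
      ∀ p ∈ (counties.foldl pvStepB d).items, (0:Int) ≤ p.2 := by
  induction counties with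
  | nil => intro d hd; exact hd
  | cons c t ih =>
    intro d hd
    rw [List.foldl_cons]
    refine ih _ ?_
    intro p hp
    unfold pvStepB at hp
    rcases (PySem.Dict.mem_items_insert _ _ _ _).mp hp with h | h
    · subst h
      have : (0:Int) ≤ d.getD (pvStateOf c) 0 := by
        cases hg : d.get? (pvStateOf c) with
        | none => rw [PySem.Dict.getD_of_get?_eq_none _ _ hg]
        | some v =>
          rw [PySem.Dict.getD_of_get?_eq_some _ _ hg]
          exact hd _ (PySem.Dict.mem_items_of_get?_eq_some d hg)
      simpa using by omega
    · exact hd p h.1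

lemma pvFold_size_le (counties : List (List (String × String))) :
    ∀ (d : PySem.Dict String Int), d.size ≤ (counties.foldl pvStepB d).size := by
  induction counties with
  | nil => intro d; exact le_refl _
  | cons c t ih =>
    intro d
    rw [List.foldl_cons]
    refine le_trans ?_ (ih (pvStepB d c))
    unfold pvStepB
    rw [PySem.Dict.size_insert]
    split <;> omega

lemma pvFold_items_ne_nil (counties : List (List (String × String)))
    (h : counties ≠ []) :
    (counties.foldl pvStepB PySem.Dict.empty).items ≠ [] := by
  cases counties with
  | nil => exact absurd rfl h
  | cons c t =>
    rw [List.foldl_cons]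
    have h1 : (pvStepB PySem.Dict.empty c).size = 1 := by
      unfold pvStepB
      rw [PySem.Dict.size_insert]
      simp [PySem.Dict.contains_empty, PySem.Dict.size_empty]
    have := pvFold_size_le t (pvStepB PySem.Dict.empty c)
    rw [h1] at this
    intro hnil
    have : (t.foldl pvStepB (pvStepB PySem.Dict.empty c)).size = 0 := by
      unfold PySem.Dict.size
      rw [hnil]; rfl
    omega

-- xs[len(xs)-1] is the last element of a nonempty list
lemma pvPyGet_last (xs : List (String × Int)) (h : xs ≠ []) :
    PySem.List.pyGet? xs ((xs.length : Int) - 1) = xs.getLast? := by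
  have hlen : 0 < xs.length := List.length_pos_iff.mpr h
  unfold PySem.List.pyGet? PySem.List.pyIdx?
  have h0 : (0:Int) ≤ (xs.length : Int) - 1 := by omega
  have h1 : (xs.length : Int) - 1 < (xs.length : Int) := by omega
  rw [if_pos h0, if_pos h1]
  have htn : ((xs.length : Int) - 1).toNat = xs.length - 1 := by omega
  rw [htn]
  simp [List.getLast?_eq_getElem?]

-- ===== VERDICT (by name: the statement is the Claim_ definition above) =====
theorem state_with_most_counties_spec : Claim_equal_state_with_most_counties := by
  intro counties _ hpre
  unfold Spec_state_with_most_counties state_with_most_counties state_with_most_counties_alt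
  simp only []
  rw [show (fun (d : PySem.Dict String Int) (c : List (String × String)) =>
        let state := pvStateOf c
        if d.contains state then d.insert state (d.getD state 0 + 1)
        else d.insert state 1) = pvStepA from rfl,
      show (fun (d : PySem.Dict String Int) (c : List (String × String)) =>
        d.insert (pvStateOf c) (d.getD (pvStateOf c) 0 + 1)) = pvStepB from rfl,
      pvBuild_eq]
  set D := counties.foldl pvStepB PySem.Dict.empty with hD
  have hne : D.items ≠ [] := pvFold_items_ne_nil counties hpre.1
  have hsz : (D.size : Int) - 1 = ((PySem.List.sorted D.items (fun p => p.2) false).length : Int) - 1 := by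
    rw [PySem.List.length_sorted]
    rfl
  have hsne : PySem.List.sorted D.items (fun p => p.2) false ≠ [] := by
    intro hnil
    exact hne ((PySem.List.sorted_eq_nil_iff _ _ _).mp hnil)
  rw [hsz, pvPyGet_last _ hsne, pvSorted_getLast?]
  have hnn : ∀ p ∈ D.items, (0:Int) ≤ p.2 := by
    refine pvFold_nonneg counties PySem.Dict.empty ?_
    intro p hp
    simp [PySem.Dict.empty] at hp
  have hscan := pvScan_eq D.items none hnn
  obtain ⟨q, hq⟩ : ∃ q, D.items.foldl pvG none = some q := by
    cases hfq : D.items.foldl pvG none with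
    | none =>
      exfalso
      have := pvSorted_getLast? D.items
      rw [hfq] at this
      exact hsne (List.getLast?_eq_none_iff.mp this)
    | some q => exact ⟨q, rfl⟩
  rw [hq]
  rw [hq] at hscan
  simp only [pvH] at hscan
  rw [hscan]
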